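-- pv_equiv track=rewrite | github.com/piface/pifacecommon | pifacecommon/core.py | get_bit_num
-- ===== SOURCE A (Python) =====
-- def get_bit_num(bit_pattern):
--     """Returns the lowest bit num from a given bit pattern. Returns None if no
--     bits set.
--
--     :param bit_pattern: The bit pattern.
--     :type bit_pattern: int
--     :returns: int -- the bit number
--     :returns: None -- no bits set
--
--     >>> pifacecommon.core.get_bit_num(0)
--     None
--     >>> pifacecommon.core.get_bit_num(0b1)
--     0
--     >>> pifacecommon.core.get_bit_num(0b11000)
--     3
--     """
--     if bit_pattern == 0:
--         return None
--
--     bit_num = 0  # assume bit 0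
--     while (bit_pattern & 1) == 0:
--         bit_pattern = bit_pattern >> 1
--         bit_num += 1
--         if bit_num > 7:
--             bit_num = 0
--             break
--
--     return bit_num
-- ===== SOURCE B (Python) =====
-- def get_bit_num(bit_pattern):
--     if bit_pattern == 0:
--         return None
--     p = (bit_pattern & -bit_pattern).bit_length() - 1
--     return p if p <= 7 else 0
-- ===== Notes on version B (the rewrite author's own statement) =====
-- stated objective: idiomatic
-- what changed: Replaced the shift-and-count while loop by the closed-form lowest-set-bit trick (bit_pattern & -bit_pattern).bit_length() - 1, with the same cap-to-0 for bit positions above 7.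
import Mathlib
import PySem

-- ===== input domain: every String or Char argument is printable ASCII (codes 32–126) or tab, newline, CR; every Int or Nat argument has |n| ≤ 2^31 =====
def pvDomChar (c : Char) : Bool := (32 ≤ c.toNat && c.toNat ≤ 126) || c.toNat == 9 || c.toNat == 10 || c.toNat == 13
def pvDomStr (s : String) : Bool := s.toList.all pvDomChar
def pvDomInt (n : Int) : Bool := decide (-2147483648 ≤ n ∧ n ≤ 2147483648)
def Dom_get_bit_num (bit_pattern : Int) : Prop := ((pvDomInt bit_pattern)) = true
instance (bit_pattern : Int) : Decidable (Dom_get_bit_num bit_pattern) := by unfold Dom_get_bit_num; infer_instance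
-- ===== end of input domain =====

-- B replaces A's shift-and-count loop by the closed-form lowest-set-bit trick
-- (bit_pattern & -bit_pattern).bit_length() - 1, reproducing the cap-to-0 for positions > 7.

-- ===== PORT A =====
-- the while loop: state (bit_pattern, bit_num); break resets bit_num to 0 when it exceeds 7
def pvLoopA (bp bn : Int) : Int :=
  if PySem.Int.band bp 1 = 0 then
    let bp' := bp >>> (1 : Nat)
    let bn' := bn + 1
    if bn' > 7 then 0
    else pvLoopA bp' bn'
  else bn
termination_by (8 - bn).toNat
decreasing_by omega

def get_bit_num (bit_pattern : Int) : Option Int :=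
  if bit_pattern = 0 then none
  else some (pvLoopA bit_pattern 0)

-- ===== PORT B =====
def get_bit_num_alt (bit_pattern : Int) : Option Int :=
  if bit_pattern = 0 then none
  else
    let p : Int := (PySem.Int.bitLength (PySem.Int.band bit_pattern (-bit_pattern)) : Int) - 1
    if p ≤ 7 then some p else some 0

-- ===== PRECONDITION & SPEC =====
def Spec_get_bit_num (bit_pattern : Int) (out : Option Int) : Prop := out = get_bit_num_alt bit_pattern
instance (bit_pattern : Int) (out : Option Int) : Decidable (Spec_get_bit_num bit_pattern out) := by unfold Spec_get_bit_num; infer_instance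

-- ===== CLAIM (what is proved, stated in full; the proofs are below) =====
def Claim_equal_get_bit_num : Prop := ∀ (bit_pattern : Int), Dom_get_bit_num bit_pattern → Spec_get_bit_num bit_pattern (get_bit_num bit_pattern)

-- ===== LEMMAS AND PROOFS =====

-- number of trailing zero bits of a positive natural
def pvTz (m : Nat) : Nat :=
  if _h : m = 0 ∨ m % 2 = 1 then 0 else pvTz (m / 2) + 1
termination_by m
decreasing_by omega

theorem pvTz_odd {m : Nat} (h : m % 2 = 1) : pvTz m = 0 := by
  rw [pvTz]; simp [h]

theorem pvTz_even {m : Nat} (h0 : m ≠ 0) (h : m % 2 = 0) : pvTz m = pvTz (m / 2) + 1 := by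
  rw [pvTz]; simp [h0]; omega

theorem land_pred_of_odd {m : Nat} (h : m % 2 = 1) : m &&& (m - 1) = m - 1 := by
  apply Nat.eq_of_testBit_eq
  intro i
  cases i with
  | zero => simp [Nat.testBit_zero]; omega
  | succ i =>
      rw [Nat.testBit_land]
      simp only [Nat.testBit_succ]
      have : m / 2 = (m - 1) / 2 := by omega
      rw [this, Bool.and_self]

theorem land_pred_double {m : Nat} (h : 1 ≤ m) :
    (2 * m) &&& (2 * m - 1) = 2 * (m &&& (m - 1)) := by
  apply Nat.eq_of_testBit_eq
  intro i
  cases i with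
  | zero =>
      rw [Nat.testBit_land]
      simp [Nat.testBit_zero]
  | succ i =>
      rw [Nat.testBit_land]
      simp only [Nat.testBit_succ]
      have h1 : 2 * m / 2 = m := by omega
      have h2 : (2 * m - 1) / 2 = m - 1 := by omega
      have h3 : 2 * (m &&& (m - 1)) / 2 = m &&& (m - 1) := by omega
      rw [h1, h2, h3, Nat.testBit_land]

theorem sub_land_pred_eq_pow (m : Nat) (hm : 0 < m) :
    m - (m &&& (m - 1)) = 2 ^ pvTz m := by
  induction m using Nat.strong_induction_on with
  | _ m ih =>
    rcases Nat.even_or_odd m with he | ho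
    · obtain ⟨k, hk⟩ := he
      have hk2 : m = 2 * k := by omega
      have hkpos : 0 < k := by omega
      have hland : m &&& (m - 1) = 2 * (k &&& (k - 1)) := by
        rw [hk2]; exact land_pred_double hkpos
      have hle : k &&& (k - 1) ≤ k - 1 := Nat.and_le_right
      have htz : pvTz m = pvTz k + 1 := by
        have hk' : m / 2 = k := by omega
        rw [pvTz_even (by omega : m ≠ 0) (by omega : m % 2 = 0), hk']
      have ihk := ih k (by omega) hkpos
      rw [hland, htz, pow_succ]
      omega
    · have hmod : m % 2 = 1 := Nat.odd_iff.mp ho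
      rw [land_pred_of_odd hmod, pvTz_odd hmod]
      omega

theorem band_one (n : Int) : PySem.Int.band n 1 = n % 2 := by
  unfold PySem.Int.band
  by_cases h : 0 ≤ n
  · rw [if_pos h, if_pos (by norm_num : (0:Int) ≤ 1),
        show Int.toNat 1 = 1 from rfl, Nat.and_one_is_mod]
    omega
  · rw [if_neg h, if_pos (by norm_num : (0:Int) ≤ 1),
        show Int.toNat 1 = 1 from rfl, Nat.and_comm, Nat.and_one_is_mod]
    omega

theorem band_self_neg {n : Int} (h : n ≠ 0) :
    PySem.Int.band n (-n) = ((n.natAbs - (n.natAbs &&& (n.natAbs - 1)) : Nat) : Int) := by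
  unfold PySem.Int.band
  rcases lt_or_gt_of_ne h with hneg | hpos
  · have h1 : ¬ (0 ≤ n) := by omega
    have h2 : (0 : Int) ≤ -n := by omega
    simp only [h1, h2, if_true, if_false]
    have e1 : (-n).toNat = n.natAbs := by omega
    have e2 : (-n - 1).toNat = n.natAbs - 1 := by omega
    rw [e1, e2]
  · have h1 : (0 : Int) ≤ n := by omega
    have h2 : ¬ ((0 : Int) ≤ -n) := by omega
    simp only [h1, h2, if_true, if_false]
    have e1 : n.toNat = n.natAbs := by omega
    have e2 : (- -n - 1).toNat = n.natAbs - 1 := by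
      have : - -n - 1 = n - 1 := by ring
      rw [this]; omega
    rw [e1, e2]

theorem bitLength_pow (t : Nat) : PySem.Int.bitLength ((2 ^ t : Nat) : Int) = t + 1 := by
  induction t with
  | zero => decide
  | succ t ih =>
      rw [PySem.Int.bitLength_natCast (by positivity)]
      have : 2 ^ (t + 1) / 2 = 2 ^ t := by
        rw [pow_succ]; omega
      rw [this, ih]

theorem shiftRight_one_eq (n : Int) : n >>> (1 : Nat) = n / 2 := by
  rw [Int.shiftRight_eq_div_pow]
  norm_num

theorem loopA_char (m : Nat) : ∀ n : Int, n.natAbs = m → n ≠ 0 → ∀ c : Int, 0 ≤ c → c ≤ 7 →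
    pvLoopA n c = if (pvTz n.natAbs : Int) + c ≤ 7 then (pvTz n.natAbs : Int) + c else 0 := by
  induction m using Nat.strong_induction_on with
  | _ m ih =>
    intro n hm hn c hc0 hc7
    rw [pvLoopA, band_one]
    by_cases heven : n % 2 = 0
    · simp only [heven, if_true]
      have hmod : n.natAbs % 2 = 0 := by omega
      have hma : n.natAbs ≥ 2 := by omega
      have htz : pvTz n.natAbs = pvTz (n.natAbs / 2) + 1 :=
        pvTz_even (by omega) hmod
      by_cases hcap : c + 1 > 7
      · simp only [hcap, if_true]
        rw [htz]
        push_cast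
        split_ifs <;> omega
      · simp only [hcap, if_false]
        have hsh : n >>> (1 : Nat) = n / 2 := shiftRight_one_eq n
        have hna : (n / 2).natAbs = n.natAbs / 2 := by omega
        have hnz : n / 2 ≠ 0 := by omega
        have hlt : n.natAbs / 2 < m := by omega
        have hc1 : (0:Int) ≤ c + 1 := by omega
        have hc2 : c + 1 ≤ 7 := by omega
        rw [hsh, ih (n.natAbs / 2) hlt (n / 2) hna hnz (c + 1) hc1 hc2]
        rw [hna, htz]
        push_cast
        split_ifs <;> omega
    · have hodd : n % 2 = 1 := by omega
      rw [if_neg heven]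
      have h0 : pvTz n.natAbs = 0 := pvTz_odd (by omega)
      rw [h0]
      push_cast
      split_ifs <;> omega

theorem alt_char {n : Int} (h : n ≠ 0) :
    get_bit_num_alt n =
      some (if (pvTz n.natAbs : Int) ≤ 7 then (pvTz n.natAbs : Int) else 0) := by
  unfold get_bit_num_alt
  rw [if_neg h]
  have hpos : 0 < n.natAbs := by omega
  have h1 : PySem.Int.band n (-n) = ((2 ^ pvTz n.natAbs : Nat) : Int) := by
    rw [band_self_neg h, sub_land_pred_eq_pow n.natAbs hpos]
  simp only [h1, bitLength_pow]
  push_cast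
  split_ifs <;> simp <;> omega

-- ===== VERDICT (by name: the statement is the Claim_ definition above) =====
theorem get_bit_num_spec : Claim_equal_get_bit_num := by
  intro n _
  unfold Spec_get_bit_num
  by_cases h : n = 0
  · subst h; rfl
  · unfold get_bit_num
    rw [if_neg h, alt_char h,
        loopA_char n.natAbs n rfl h 0 (by omega) (by omega)]
    simp
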